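-- pv_equiv track=rewrite | github.com/jamesfrancis2004/The-X-programming-Language | new-x/Println.py | skip_to_end
-- ===== SOURCE A (Python) =====
-- def skip_to_end(tokenized_text, pos, line_count):
--     while (pos < len(tokenized_text)):
--         if tokenized_text[pos] == ";":
--             return pos+1, line_count, False
--         elif tokenized_text[pos] == '\n':
--             line_count += 1
--
--         pos += 1
--
--     return pos, line_count, False
-- ===== SOURCE B (Python) =====
-- def skip_to_end(tokenized_text, pos, line_count):
--     if pos >= len(tokenized_text):
--         return pos, line_count, False
--     seg = tokenized_text[pos:]
--     start = len(tokenized_text) - len(seg)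
--     try:
--         k = seg.index(';')
--         return start + k + 1, line_count + seg[:k].count('\n'), False
--     except ValueError:
--         return len(tokenized_text), line_count + seg.count('\n'), False
-- ===== Notes on version B (the rewrite author's own statement) =====
-- stated objective: simpler
-- what changed: Replaces A's fused token-by-token while-loop (test for ';', count newlines, bump pos in one loop) with a find-then-count decomposition: locate the next ';' with list.index on the slice t[pos:] and count the '\n' tokens in the skipped slice.
-- intended difference: On -len(t) <= pos < 0 with a ';' or '\n' token present, A wraps the negative index and scans the last |pos| tokens and then the whole list again (returning a non-positive resume position or double-counting newlines), while B scans only the tail t[pos:] per Python slice semantics, which is the intended 'resume after the next semicolon' behaviour. — e.g. on skip_to_end(["\n"], -1, 0): A returns (1, 2, false), B returns (1, 1, false)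
import Mathlib
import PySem

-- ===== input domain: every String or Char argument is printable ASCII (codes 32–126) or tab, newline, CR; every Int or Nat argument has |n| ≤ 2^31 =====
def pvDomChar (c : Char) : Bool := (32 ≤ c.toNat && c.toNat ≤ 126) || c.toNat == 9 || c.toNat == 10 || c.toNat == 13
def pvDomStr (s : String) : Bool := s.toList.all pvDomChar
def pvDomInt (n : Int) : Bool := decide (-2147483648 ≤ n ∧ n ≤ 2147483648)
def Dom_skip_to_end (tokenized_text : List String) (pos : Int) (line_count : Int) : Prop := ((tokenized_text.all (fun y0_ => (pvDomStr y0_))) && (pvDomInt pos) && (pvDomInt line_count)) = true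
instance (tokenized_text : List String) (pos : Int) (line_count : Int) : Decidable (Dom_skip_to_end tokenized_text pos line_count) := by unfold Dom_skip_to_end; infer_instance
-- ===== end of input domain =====

-- B replaces A's fused character-by-character while-loop with a find-then-count decomposition
-- (locate the next ";" with list.index, then count the newlines in the skipped slice); same cost, plainer shape.

-- ===== PORT A =====
-- the while-loop of A, fuel = number of remaining iterations; `none` from pyGet? is Python's
-- IndexError (reachable only when pos < -len, excluded by Pre_)
def skipLoopA (t : List String) (fuel : Nat) (pos lc : Int) : Int × Int × Bool :=
  match fuel with
  | 0 => (pos, lc, false)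
  | Nat.succ f =>
    if pos < (t.length : Int) then
      match PySem.List.pyGet? t pos with
      | none => (pos, lc, false)
      | some s =>
        if s = ";" then (pos + 1, lc, false)
        else if s = "\n" then skipLoopA t f (pos + 1) (lc + 1)
        else skipLoopA t f (pos + 1) lc
    else (pos, lc, false)

def skip_to_end (tokenized_text : List String) (pos : Int) (line_count : Int) : Int × Int × Bool :=
  skipLoopA tokenized_text ((tokenized_text.length : Int) - pos).toNat pos line_count

-- ===== PORT B =====
def skip_to_end_alt (tokenized_text : List String) (pos : Int) (line_count : Int) : Int × Int × Bool :=
  if (tokenized_text.length : Int) ≤ pos then (pos, line_count, false)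
  else
    let seg := PySem.List.slice tokenized_text (some pos) none
    let start : Int := (tokenized_text.length : Int) - (seg.length : Int)
    match PySem.List.index? seg ";" with
    | some k =>
        (start + (k : Int) + 1,
         line_count + (PySem.List.count (PySem.List.slice seg none (some (k : Int))) "\n" : Int),
         false)
    | none =>
        ((tokenized_text.length : Int),
         line_count + (PySem.List.count seg "\n" : Int),
         false)

-- ===== PRECONDITION & SPEC =====
-- Pre_ excludes exactly pos < -len(tokenized_text), where A raises IndexError on the wrapped element access.
def Pre_skip_to_end (tokenized_text : List String) (pos : Int) (line_count : Int) : Prop :=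
  -(tokenized_text.length : Int) ≤ pos
instance (tokenized_text : List String) (pos : Int) (line_count : Int) : Decidable (Pre_skip_to_end tokenized_text pos line_count) := by unfold Pre_skip_to_end; infer_instance
def pvWitness_skip_to_end : List String × Int × Int := (["print", "\n", ";", "x"], 0, 0)

-- On -len ≤ pos < 0 with a ";" or "\n" token present, A wraps the negative index and scans the last |pos|
-- tokens and then the whole list again (double-counting newlines, or returning a non-positive resume position),
-- while B uses Python's slice semantics and scans only the tail t[pos:], which is the intended "resume
-- after the next semicolon" behaviour.
def D_skip_to_end (tokenized_text : List String) (pos : Int) (line_count : Int) : Prop :=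
  -(tokenized_text.length : Int) ≤ pos ∧ pos < 0 ∧ (";" ∈ tokenized_text ∨ "\n" ∈ tokenized_text)
instance (tokenized_text : List String) (pos : Int) (line_count : Int) : Decidable (D_skip_to_end tokenized_text pos line_count) := by unfold D_skip_to_end; infer_instance
def Spec_skip_to_end (tokenized_text : List String) (pos : Int) (line_count : Int) (out : Int × Int × Bool) : Prop := ¬ D_skip_to_end tokenized_text pos line_count → out = skip_to_end_alt tokenized_text pos line_count
instance (tokenized_text : List String) (pos : Int) (line_count : Int) (out : Int × Int × Bool) : Decidable (Spec_skip_to_end tokenized_text pos line_count out) := by unfold Spec_skip_to_end; infer_instance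
def pvDiffWitness_skip_to_end : List String × Int × Int := (["\n"], -1, 0)
def pvDiffWitnessOut_skip_to_end : (Int × Int × Bool) × (Int × Int × Bool) := ((1, 2, false), (1, 1, false))

-- ===== CLAIM =====
def Claim_unchanged_skip_to_end : Prop := ∀ (tokenized_text : List String) (pos : Int) (line_count : Int), Dom_skip_to_end tokenized_text pos line_count → Pre_skip_to_end tokenized_text pos line_count → Spec_skip_to_end tokenized_text pos line_count (skip_to_end tokenized_text pos line_count)
def Claim_changed_skip_to_end : Prop := Dom_skip_to_end (pvDiffWitness_skip_to_end.1) (pvDiffWitness_skip_to_end.2.1) (pvDiffWitness_skip_to_end.2.2) ∧ Pre_skip_to_end (pvDiffWitness_skip_to_end.1) (pvDiffWitness_skip_to_end.2.1) (pvDiffWitness_skip_to_end.2.2) ∧ D_skip_to_end (pvDiffWitness_skip_to_end.1) (pvDiffWitness_skip_to_end.2.1) (pvDiffWitness_skip_to_end.2.2) ∧ skip_to_end (pvDiffWitness_skip_to_end.1) (pvDiffWitness_skip_to_end.2.1) (pvDiffWitness_skip_to_end.2.2) = pvDiffWitnessOut_skip_to_end.1 ∧ skip_to_end_alt (pvDiffWitness_skip_to_end.1)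 (pvDiffWitness_skip_to_end.2.1) (pvDiffWitness_skip_to_end.2.2) = pvDiffWitnessOut_skip_to_end.2 ∧ pvDiffWitnessOut_skip_to_end.1 ≠ pvDiffWitnessOut_skip_to_end.2
def Claim_exact_skip_to_end : Prop := ∀ (tokenized_text : List String) (pos : Int) (line_count : Int), Dom_skip_to_end tokenized_text pos line_count → Pre_skip_to_end tokenized_text pos line_count → D_skip_to_end tokenized_text pos line_count → skip_to_end tokenized_text pos line_count ≠ skip_to_end_alt tokenized_text pos line_count
-- ===== LEMMAS AND PROOFS =====

-- B's core shape: what scanning the suffix `seg` of `t` computes.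
def bCore (t seg : List String) (lc : Int) : Int × Int × Bool :=
  match PySem.List.index? seg ";" with
  | some k => ((t.length : Int) - (seg.length : Int) + (k : Int) + 1, lc + ((seg.take k).count "\n" : Int), false)
  | none => ((t.length : Int), lc + (seg.count "\n" : Int), false)

-- head and tail of a suffix `s :: rest = t.drop n`
lemma head_of_drop {α : Type} {t : List α} {n : Nat} {s : α} {rest : List α}
    (h : s :: rest = t.drop n) : t[n]? = some s := by
  have h0 : (t.drop n)[0]? = some s := by rw [← h]; rfl
  rw [List.getElem?_drop] at h0
  simpa using h0

lemma tail_of_drop {α : Type} {t : List α} {n : Nat} {s : α} {rest : List α}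
    (h : s :: rest = t.drop n) : rest = t.drop (n + 1) := by
  have h0 : (t.drop n).tail = t.drop (n + 1) := List.tail_drop
  rw [← h] at h0
  simpa using h0

lemma drop_lt_of_cons {α : Type} {t : List α} {n : Nat} {s : α} {rest : List α}
    (h : s :: rest = t.drop n) : n < t.length := by
  by_contra hc
  have : t.drop n = [] := List.drop_eq_nil_iff.mpr (by omega)
  rw [← h] at this
  simp at this

-- A's loop, started at a non-negative position, computes B's core on the corresponding suffix.
lemma loopA_eq (seg : List String) : ∀ (t : List String) (pos lc : Int),
    0 ≤ pos → pos ≤ (t.length : Int) → seg = t.drop pos.toNat →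
    skipLoopA t seg.length pos lc = bCore t seg lc := by
  induction seg with
  | nil =>
    intro t pos lc h0 hle hseg
    have hlen : t.length ≤ pos.toNat := List.drop_eq_nil_iff.mp hseg.symm
    have hpos : pos = (t.length : Int) := by omega
    have hnone : PySem.List.index? ([] : List String) ";" = none := by
      rw [PySem.List.index?_eq_none_iff]; simp
    simp [skipLoopA, bCore, hpos, hnone]
  | cons s rest ih =>
    intro t pos lc h0 hle hseg
    have hlen : pos.toNat < t.length := drop_lt_of_cons hseg
    have hlenseg : rest.length + 1 = t.length - pos.toNat := by
      have := congrArg List.length hseg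
      simp [List.length_drop] at this
      omega
    have hlt : pos < (t.length : Int) := by omega
    have hget : PySem.List.pyGet? t pos = some s := by
      rw [PySem.List.pyGet?_eq_some_getElem t h0 (by omega)]
      have h0' := head_of_drop hseg
      rw [List.getElem?_eq_getElem hlen] at h0'
      simpa using h0'
    have hrest : rest = t.drop (pos + 1).toNat := by
      rw [show (pos + 1).toNat = pos.toNat + 1 by omega]
      exact tail_of_drop hseg
    show skipLoopA t (rest.length + 1) pos lc = _
    by_cases hs : s = ";"
    · subst hs
      unfold bCore
      rw [PySem.List.index?_cons_self]
      simp [skipLoopA, hlt, hget]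
      omega
    · by_cases hn : s = "\n"
      · subst hn
        have hih := ih t (pos + 1) (lc + 1) (by omega) (by omega) hrest
        simp only [skipLoopA, if_pos hlt, hget, if_neg hs, hih, bCore,
          PySem.List.index?_cons_of_ne rest hs]
        cases hidx : PySem.List.index? rest ";" with
        | none => simp [List.count_cons]; omega
        | some k => simp [List.count_cons]; omega
      · have hih := ih t (pos + 1) lc (by omega) (by omega) hrest
        simp only [skipLoopA, if_pos hlt, hget, if_neg hs, if_neg hn, hih, bCore,
          PySem.List.index?_cons_of_ne rest hs]
        cases hidx : PySem.List.index? rest ";" with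
        | none => simp [List.count_cons, hn]
        | some k => simp [List.count_cons, hn]; omega

-- A's loop started at a negative position: it scans the wrapped tail, then restarts at 0.
lemma loopA_wrap (tail : List String) : ∀ (t : List String) (pos lc : Int),
    pos < 0 → 0 ≤ (t.length : Int) + pos → tail = t.drop ((t.length : Int) + pos).toNat →
    skipLoopA t ((t.length : Int) - pos).toNat pos lc =
      (match PySem.List.index? tail ";" with
       | some k => (pos + (k : Int) + 1, lc + ((tail.take k).count "\n" : Int), false)
       | none => skipLoopA t t.length 0 (lc + (tail.count "\n" : Int))) := by
  induction tail with
  | nil =>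
    intro t pos lc hneg hge htail
    exfalso
    have h1 := List.drop_eq_nil_iff.mp htail.symm
    omega
  | cons s rest ih =>
    intro t pos lc hneg hge htail
    have hlenpos : ((t.length : Int) + pos).toNat < t.length := drop_lt_of_cons htail
    have hlt : pos < (t.length : Int) := by omega
    have hget : PySem.List.pyGet? t pos = some s := by
      rw [PySem.List.pyGet?_neg t hneg (by omega)]
      have hidx : t.length - (-pos).toNat = ((t.length : Int) + pos).toNat := by omega
      rw [hidx]
      exact head_of_drop htail
    have hrest : rest = t.drop (((t.length : Int) + pos).toNat + 1) := tail_of_drop htail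
    have hfuel : ((t.length : Int) - pos).toNat = (((t.length : Int) - (pos + 1)).toNat) + 1 := by omega
    rw [hfuel]
    show skipLoopA t (_ + 1) pos lc = _
    by_cases hs : s = ";"
    · subst hs
      rw [PySem.List.index?_cons_self]
      simp [skipLoopA, hlt, hget]
    · by_cases h0 : pos + 1 = 0
      · -- last wrapped step: rest is empty, continue from position 0
        have hrnil : rest = [] := by
          rw [hrest]
          apply List.drop_eq_nil_iff.mpr
          omega
        subst hrnil
        have hnone : PySem.List.index? ([] : List String) ";" = none := by
          rw [PySem.List.index?_eq_none_iff]; simp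
        have hfuel0 : ((t.length : Int) - (pos + 1)).toNat = t.length := by omega
        by_cases hn : s = "\n"
        · subst hn
          simp [skipLoopA, hlt, hget, hs, hfuel0, h0,
            PySem.List.index?_cons_of_ne ([] : List String) hs, hnone]
        · simp [skipLoopA, hlt, hget, hs, hn, hfuel0, h0,
            PySem.List.index?_cons_of_ne ([] : List String) hs, hnone, List.count_cons]
      · have hrest' : rest = t.drop ((t.length : Int) + (pos + 1)).toNat := by
          rw [hrest]; congr 1; omega
        by_cases hn : s = "\n"
        · subst hn
          have hih := ih t (pos + 1) (lc + 1) (by omega) (by omega) hrest'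
          simp only [skipLoopA, if_pos hlt, hget, if_neg hs, hih,
            PySem.List.index?_cons_of_ne rest hs]
          cases hidx : PySem.List.index? rest ";" with
          | none => simp [List.count_cons]; congr 1; omega
          | some k => simp [List.count_cons]; omega
        · have hih := ih t (pos + 1) lc (by omega) (by omega) hrest'
          simp only [skipLoopA, if_pos hlt, hget, if_neg hs, if_neg hn, hih,
            PySem.List.index?_cons_of_ne rest hs]
          cases hidx : PySem.List.index? rest ";" with
          | none => simp [List.count_cons, hn]
          | some k => simp [List.count_cons, hn]; omega

lemma clampIdx_neg (n : Nat) (a : Int) (h1 : a < 0) (h2 : -(n : Int) ≤ a) :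
    PySem.List.clampIdx n a = ((n : Int) + a).toNat := by
  simp only [PySem.List.clampIdx, if_pos h1]
  split <;> omega

-- B's port, for pos < len, is bCore on the slice.
lemma alt_eq_bCore (t : List String) (pos lc : Int) (h : pos < (t.length : Int)) (h0 : 0 ≤ pos) :
    skip_to_end_alt t pos lc = bCore t (t.drop pos.toNat) lc := by
  unfold skip_to_end_alt bCore
  rw [if_neg (by omega)]
  simp only [PySem.List.slice_from t h0]
  cases hidx : PySem.List.index? (t.drop pos.toNat) ";" with
  | none => simp [PySem.List.count_eq]
  | some k => simp [PySem.List.count_eq, PySem.List.slice_to_natCast]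

lemma alt_eq_bCore_neg (t : List String) (pos lc : Int) (h1 : pos < 0) (h2 : -(t.length : Int) ≤ pos) :
    skip_to_end_alt t pos lc = bCore t (t.drop ((t.length : Int) + pos).toNat) lc := by
  unfold skip_to_end_alt bCore
  rw [if_neg (by omega)]
  simp only [PySem.List.slice_some_none, clampIdx_neg t.length pos h1 h2]
  cases hidx : PySem.List.index? (t.drop ((t.length : Int) + pos).toNat) ";" with
  | none => simp [PySem.List.count_eq]
  | some k => simp [PySem.List.count_eq, PySem.List.slice_to_natCast]

-- ===== VERDICT =====
theorem skip_to_end_spec : Claim_unchanged_skip_to_end := by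
  intro t pos lc _hdom hpre hnd
  by_cases hge : (t.length : Int) ≤ pos
  · -- loop never runs
    have hfuel : ((t.length : Int) - pos).toNat = 0 := by omega
    simp [skip_to_end, hfuel, skipLoopA, skip_to_end_alt, if_pos hge]
  · by_cases h0 : 0 ≤ pos
    · -- ordinary scan from a non-negative position
      have hseg : t.drop pos.toNat = t.drop pos.toNat := rfl
      have hlen : ((t.length : Int) - pos).toNat = (t.drop pos.toNat).length := by
        simp [List.length_drop]; omega
      rw [skip_to_end, hlen, loopA_eq (t.drop pos.toNat) t pos lc h0 (by omega) rfl,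
        alt_eq_bCore t pos lc (by omega) h0]
    · -- pos < 0, outside D_: the list holds no ";" and no "\n"
      unfold Pre_skip_to_end at hpre
      have hd : ¬ (";" ∈ t ∨ "\n" ∈ t) := by
        intro hmem
        exact hnd ⟨hpre, by omega, hmem⟩
      push_neg at hd
      have hnosemi : PySem.List.index? (t.drop ((t.length : Int) + pos).toNat) ";" = none := by
        rw [PySem.List.index?_eq_none_iff]
        intro hmem
        exact hd.1 (List.mem_of_mem_drop hmem)
      have hnosemi' : PySem.List.index? t ";" = none := by
        rw [PySem.List.index?_eq_none_iff]; exact hd.1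
      have hnonl : (t.drop ((t.length : Int) + pos).toNat).count "\n" = 0 := by
        rw [List.count_eq_zero]
        intro hmem
        exact hd.2 (List.mem_of_mem_drop hmem)
      have hnonl' : t.count "\n" = 0 := by rw [List.count_eq_zero]; exact hd.2
      rw [skip_to_end, loopA_wrap (t.drop ((t.length : Int) + pos).toNat) t pos lc (by omega) (by omega) rfl,
        alt_eq_bCore_neg t pos lc (by omega) hpre]
      simp only [hnosemi]
      rw [loopA_eq t t 0 (lc + ((t.drop ((t.length : Int) + pos).toNat).count "\n" : Int))
        (by omega) (by omega) (by simp)]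
      unfold bCore
      simp only [hnosemi', hnosemi]
      simp [hnonl, hnonl']

theorem skip_to_end_changed : Claim_changed_skip_to_end := by
  unfold Claim_changed_skip_to_end; decide

theorem skip_to_end_tight : Claim_exact_skip_to_end := by
  intro t pos lc _hdom _hpre hd heq
  obtain ⟨h2, h1, hmem⟩ := hd
  have hlenpos : 0 < t.length := by
    rcases hmem with h | h <;> exact List.length_pos_of_mem h
  set tail := t.drop ((t.length : Int) + pos).toNat with htail
  rw [skip_to_end, loopA_wrap tail t pos lc (by omega) (by omega) rfl,
    alt_eq_bCore_neg t pos lc (by omega) h2] at heq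
  have hseglen : (tail.length : Int) = (t.length : Int) - ((t.length : Int) + pos).toNat := by
    simp [htail, List.length_drop]
    omega
  cases hidx : PySem.List.index? tail ";" with
  | some k =>
    -- A resumes at pos+k+1 ≤ 0, B at (len+pos)+k+1 ≥ 1
    rw [hidx, bCore, hidx] at heq
    have := congrArg Prod.fst heq
    simp at this
    omega
  | none =>
    rw [hidx, bCore, hidx] at heq
    rw [loopA_eq t t 0 (lc + (tail.count "\n" : Int)) (by omega) (by omega) (by simp)] at heq
    cases hidx2 : PySem.List.index? t ";" with
    | some k =>
      -- first ";" in t lies strictly before the wrapped tail: k+1 < len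
      rw [bCore, hidx2] at heq
      obtain ⟨hk, hkv, hkmin⟩ := PySem.List.getElem_of_index?_eq_some hidx2
      have hkfront : k < ((t.length : Int) + pos).toNat := by
        by_contra h
        push_neg at h
        have hmemtail : ";" ∈ tail := by
          rw [htail]
          have : t[k] = (t.drop ((t.length : Int) + pos).toNat)[k - ((t.length : Int) + pos).toNat]'(by simp [List.length_drop]; omega) := by
            rw [List.getElem_drop]; congr 1; omega
          rw [hkv] at this
          exact this ▸ List.getElem_mem _
        rw [PySem.List.index?_eq_none_iff] at hidx
        exact hidx hmemtail
      have := congrArg Prod.fst heq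
      simp at this
      omega
    | none =>
      -- no ";" at all: the difference is the doubly counted newlines
      rw [PySem.List.index?_eq_none_iff] at hidx2
      have hnl : "\n" ∈ t := by tauto
      have hcnt : 0 < t.count "\n" := List.count_pos_iff.mpr hnl
      have hidx2n : PySem.List.index? t ";" = none := by
        rw [PySem.List.index?_eq_none_iff]; exact hidx2
      rw [bCore, hidx2n] at heq
      have := congrArg (fun p => p.2.1) heq
      simp at this
      have hceq : List.count "\n" tail = List.count "\n" (t.drop ((t.length : Int) + pos).toNat) := by
        rw [htail]
      omega
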